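-- pv_equiv track=rewrite | github.com/Vishal-Kumar-Sinha/python_assignments | ASSIGNMENT6.py | beauty_permu
-- ===== SOURCE A (Python) =====
-- def permu_nms(nums):
--     lst=[[]]
--     for i in nums:
--         templst=[]
--         for j in lst:
--             for k in range(len(j)+1):
--                 templst.append(j[:k]+[i]+j[k:])
--                 lst=templst
--     return lst
--
-- def beauty_permu(num):
--     lst=permu_nms(num)
--     res=[]
--     for i in range(0,len(lst)):
--         flag=True
--         for j in range(0,len(lst[i])-1):
--             if((lst[i][j] & lst[i][j+1])==0):
--                 flag=False
--                 break
--         if(flag==True):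
--             res.append(lst[i])
--     return res
-- ===== SOURCE B (Python) =====
-- def _perms(nums):
--     if not nums:
--         return [[]]
--     rest = _perms(nums[:-1])
--     x = nums[-1]
--     return [p[:k] + [x] + p[k:] for p in rest for k in range(len(p) + 1)]
--
-- def beauty_permu(num):
--     return [p for p in _perms(num)
--             if all(p[j] & p[j + 1] for j in range(len(p) - 1))]
-- ===== Notes on version B (the rewrite author's own statement) =====
-- stated objective: simpler
-- what changed: Replaces the triple-nested iterative insertion loop (with its redundant in-loop reassignment) and the index-based flag/break filter by a recursive permutation builder on the list's last element plus a comprehension filter with all().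
import Mathlib
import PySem

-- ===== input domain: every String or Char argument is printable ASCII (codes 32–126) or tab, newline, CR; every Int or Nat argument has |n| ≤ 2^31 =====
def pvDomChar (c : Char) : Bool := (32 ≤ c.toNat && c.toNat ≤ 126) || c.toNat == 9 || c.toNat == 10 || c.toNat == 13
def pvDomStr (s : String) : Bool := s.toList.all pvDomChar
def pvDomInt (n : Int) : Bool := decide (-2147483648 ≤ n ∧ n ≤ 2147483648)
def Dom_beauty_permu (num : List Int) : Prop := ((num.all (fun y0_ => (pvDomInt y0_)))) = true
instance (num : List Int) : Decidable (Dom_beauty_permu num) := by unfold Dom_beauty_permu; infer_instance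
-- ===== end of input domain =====

-- B rewrites the left-to-right insertion loop as a recursion on the list's last element and
-- expresses the adjacent-AND filter as a comprehension; objective: simpler decomposition, same cost.

-- ===== PORT A =====
-- permu_nms: lst=[[]]; for i: templst=[]; for j in lst: for k in range(len(j)+1): templst.append(j[:k]+[i]+j[k:]); lst=templst
-- (the reassignment lst=templst inside the loop has no effect on the snapshot being iterated)
def permuStepA (lst : List (List Int)) (i : Int) : List (List Int) :=
  lst.foldl (fun templst j =>
    (List.range (j.length + 1)).foldl
      (fun t k => t ++ [j.take k ++ [i] ++ j.drop k]) templst) []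

def permu_nms (nums : List Int) : List (List Int) :=
  nums.foldl permuStepA [[]]

-- inner flag loop with break: scans j = 0 .. len(p)-2, returns False at the first zero AND
def flagA (p : List Int) : List Nat → Bool
  | [] => true
  | j :: rest =>
      if PySem.Int.band (p.getD j 0) (p.getD (j + 1) 0) == 0 then false
      else flagA p rest

def beauty_permu (num : List Int) : List (List Int) :=
  (permu_nms num).foldl
    (fun res p => if flagA p (List.range (p.length - 1)) then res ++ [p] else res) []

-- ===== PORT B =====
-- recursive builder: perms of nums[:-1], then insert nums[-1] at every position (ascending)
def permsB (nums : List Int) : List (List Int) :=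
  match nums with
  | [] => [[]]
  | a :: t =>
    let x := (a :: t).getLast (by simp)
    (permsB ((a :: t).dropLast)).flatMap
      (fun p => (List.range (p.length + 1)).map (fun k => p.take k ++ [x] ++ p.drop k))
termination_by nums.length
decreasing_by simp [List.length_dropLast]

def chkB (p : List Int) : Bool :=
  (List.range (p.length - 1)).all
    (fun j => !(PySem.Int.band (p.getD j 0) (p.getD (j + 1) 0) == 0))

def beauty_permu_alt (num : List Int) : List (List Int) :=
  (permsB num).filter chkB

-- ===== PRECONDITION & SPEC =====
def Spec_beauty_permu (num : List Int) (out : List (List Int)) : Prop := out = beauty_permu_alt num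
instance (num : List Int) (out : List (List Int)) : Decidable (Spec_beauty_permu num out) := by unfold Spec_beauty_permu; infer_instance

-- ===== CLAIM (what is proved, stated in full; the proofs are below) =====
def Claim_equal_beauty_permu : Prop := ∀ (num : List Int), Dom_beauty_permu num → Spec_beauty_permu num (beauty_permu num)

-- ===== LEMMAS AND PROOFS =====

-- A's one insertion step is a flatMap of all insertions
theorem permuStepA_eq_flatMap (lst : List (List Int)) (i : Int) :
    permuStepA lst i =
      lst.flatMap (fun j => (List.range (j.length + 1)).map
        (fun k => j.take k ++ [i] ++ j.drop k)) := by
  unfold permuStepA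
  have h : ∀ (j : List Int) (templst : List (List Int)),
      (List.range (j.length + 1)).foldl
        (fun t k => t ++ [j.take k ++ [i] ++ j.drop k]) templst
      = templst ++ (List.range (j.length + 1)).map (fun k => j.take k ++ [i] ++ j.drop k) := by
    intro j templst
    exact PySem.List.foldl_append_singleton_eq_map _ _ _
  calc lst.foldl (fun templst j =>
        (List.range (j.length + 1)).foldl
          (fun t k => t ++ [j.take k ++ [i] ++ j.drop k]) templst) []
      = lst.foldl (fun templst j =>
          templst ++ (List.range (j.length + 1)).map (fun k => j.take k ++ [i] ++ j.drop k)) [] := by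
        exact PySem.List.foldl_congr_mem _ _ _ _ (fun acc a _ => h a acc)
    _ = _ := by
        simpa using PySem.List.foldl_append_eq_flatMap
          (fun j => (List.range (j.length + 1)).map (fun k => j.take k ++ [i] ++ j.drop k)) lst []

theorem permsB_concat (ys : List Int) (x : Int) :
    permsB (ys ++ [x]) =
      (permsB ys).flatMap (fun p => (List.range (p.length + 1)).map
        (fun k => p.take k ++ [x] ++ p.drop k)) := by
  cases hys : ys ++ [x] with
  | nil => simp at hys
  | cons a t =>
    rw [permsB]
    have h1 : (a :: t).dropLast = ys := by rw [← hys]; exact List.dropLast_concat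
    have hg : (a :: t).getLast? = some x := by rw [← hys]; simp
    have h2 : (a :: t).getLast (by simp) = x := by
      have := List.getLast?_eq_some_getLast (l := a :: t) (by simp)
      rw [this] at hg
      exact Option.some.inj hg
    rw [h1, h2]

-- builder equality by induction on the last element
theorem permu_nms_eq_permsB (nums : List Int) : permu_nms nums = permsB nums := by
  induction nums using List.reverseRecOn with
  | nil => simp [permu_nms, permsB]
  | append_singleton ys x ih =>
    unfold permu_nms
    rw [List.foldl_append]
    show permuStepA (permu_nms ys) x = _
    rw [permuStepA_eq_flatMap, ih, permsB_concat]

-- A's break loop computes the same boolean as B's all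
theorem flagA_eq_all (p : List Int) (js : List Nat) :
    flagA p js = js.all (fun j => !(PySem.Int.band (p.getD j 0) (p.getD (j + 1) 0) == 0)) := by
  induction js with
  | nil => rfl
  | cons j rest ih =>
    unfold flagA
    rw [ih]
    simp only [List.all_cons, Bool.beq_eq_decide_eq]
    by_cases h : PySem.Int.band (p.getD j 0) (p.getD (j + 1) 0) = 0
    · simp [h]
    · simp [h]

-- ===== VERDICT (by name: the statement is the Claim_ definition above) =====
theorem beauty_permu_spec : Claim_equal_beauty_permu := by
  intro num _
  show beauty_permu num = beauty_permu_alt num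
  unfold beauty_permu beauty_permu_alt
  have hfilter :
      (permu_nms num).foldl
        (fun res p => if flagA p (List.range (p.length - 1)) then res ++ [p] else res) []
      = (permu_nms num).filter (fun p => flagA p (List.range (p.length - 1))) := by
    simpa using PySem.List.foldl_append_if_eq_filter
      (fun p => flagA p (List.range (p.length - 1))) (l := permu_nms num) (acc := [])
  rw [hfilter, permu_nms_eq_permsB]
  apply List.filter_congr
  intro p _
  rw [flagA_eq_all]
  rfl
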